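-- pv_equiv track=rewrite | github.com/konnn04/simple-comc-ai-system | server/myapp/tech/silero_stt.py | _clean_duplicated_words
-- ===== SOURCE A (Python) =====
-- from typing import Dict, List, Any, Optional, Union, Tuple
--
-- def _clean_duplicated_words(words_list: List[str]) -> List[str]:
--     """Remove duplicated words/syllables from transcription"""
--     if not words_list:
--         return []
--
--     # Handle duplicated prefixes/suffixes within words
--     cleaned_words = []
--     for word in words_list:
--         # Skip very short words
--         if len(word) <= 2:
--             cleaned_words.append(word)
--             continue
--
--         # Check for repetitive patterns (like "learlearningning")
--         cleaned_word = word
--         for length in range(2, len(word) // 2 + 1):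
--             for i in range(len(word) - length * 2 + 1):
--                 chunk1 = word[i:i+length]
--                 chunk2 = word[i+length:i+length*2]
--                 if chunk1 == chunk2:
--                     # Found a repetition, remove it
--                     cleaned_word = word[:i+length] + word[i+length*2:]
--                     break
--
--         cleaned_words.append(cleaned_word)
--
--     # Handle duplicated whole words (like "people people")
--     result = []
--     prev_word = None
--     for word in cleaned_words:
--         if word != prev_word:  # Skip if current word is same as previous
--             result.append(word)
--         prev_word = word
--
--     return result
-- ===== SOURCE B (Python) =====
-- def _clean_word(word):
--     n = len(word)
--     if n <= 2:
--         return word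
--     # largest chunk length with an adjacent repetition wins; smallest start index for it
--     for L in reversed(range(2, n // 2 + 1)):
--         # prefix sums of the mismatch array word[j] != word[j+L]: window sum 0 <=> chunks equal
--         p = [0]
--         for j in range(n - L):
--             p.append(p[-1] + (1 if word[j] != word[j + L] else 0))
--         for i in range(n - 2 * L + 1):
--             if p[i + L] - p[i] == 0:
--                 return word[:i + L] + word[i + 2 * L:]
--     return word
--
--
-- def _clean_duplicated_words(words_list):
--     result = []
--     prev = None
--     for word in words_list:
--         w = _clean_word(word)
--         if w != prev:
--             result.append(w)
--         prev = w
--     return result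
-- ===== Notes on version B (the rewrite author's own statement) =====
-- stated objective: alternative
-- what changed: Per word, B replaces A's slice comparison for every (length, start) pair by per-length prefix sums of the mismatch array (a constant-time zero-window test) and scans candidate lengths largest-first with an early return instead of A's ascending overwrite loop; the consecutive-word dedup is fused into the same single pass. B avoids A's worst-case O(n^3) slice comparisons per word, but on random inputs A's C-level slice compares are not slower, so no speed is claimed.
import Mathlib
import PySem

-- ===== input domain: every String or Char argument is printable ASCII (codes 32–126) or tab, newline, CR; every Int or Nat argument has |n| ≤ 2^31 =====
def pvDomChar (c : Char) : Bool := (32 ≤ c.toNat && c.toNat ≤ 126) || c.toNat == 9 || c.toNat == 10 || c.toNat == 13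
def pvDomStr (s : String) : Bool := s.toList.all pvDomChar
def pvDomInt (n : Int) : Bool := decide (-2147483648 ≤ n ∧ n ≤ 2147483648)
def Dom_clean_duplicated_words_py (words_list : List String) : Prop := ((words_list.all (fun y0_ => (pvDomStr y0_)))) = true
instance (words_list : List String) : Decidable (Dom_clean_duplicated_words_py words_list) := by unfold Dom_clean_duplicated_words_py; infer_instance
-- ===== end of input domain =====

-- B detects the repeated chunk with per-length mismatch prefix sums (a constant-time window test)
-- and scans candidate lengths largest-first with an early return; A compares slices pairwise.

-- ===== PORT A =====
-- inner 'for i in range(...)' with break: first i whose adjacent chunks of length L are equal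
def pvAInner (cs : List Char) (L : Int) : List Int → Option Int
  | [] => none
  | i :: rest =>
    if PySem.List.slice cs (some i) (some (i + L)) =
       PySem.List.slice cs (some (i + L)) (some (i + L * 2)) then some i
    else pvAInner cs L rest

-- outer 'for length in range(2, len(word)//2 + 1)' carrying cleaned_word
def pvAOuter (cs : List Char) : List Int → List Char → List Char
  | [], c => c
  | L :: rest, c =>
    match pvAInner cs L (PySem.List.pyRange 0 ((cs.length : Int) - L * 2 + 1) 1) with
    | some i =>
        pvAOuter cs rest
          (PySem.List.slice cs none (some (i + L)) ++ PySem.List.slice cs (some (i + L * 2)) none)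
    | none => pvAOuter cs rest c

-- body of A's first loop for one word (the 'len(word) <= 2: continue' shortcut included)
def pvACleanWord (word : String) : String :=
  let cs := word.toList
  if cs.length ≤ 2 then word
  else String.ofList
    (pvAOuter cs (PySem.List.pyRange 2 (PySem.Int.floordiv (cs.length : Int) 2 + 1) 1) cs)

-- A's second loop: drop a word equal to the previous one
def pvADedup : List String → Option String → List String → List String
  | [], _, res => res
  | w :: rest, prev, res =>
    pvADedup rest (some w) (if some w ≠ prev then res ++ [w] else res)

def clean_duplicated_words_py (words_list : List String) : List String :=
  if words_list = [] then []
  else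
    let cleaned := words_list.foldl (fun acc w => acc ++ [pvACleanWord w]) []
    pvADedup cleaned none []

-- ===== PORT B =====
-- p: prefix sums of the mismatch array word[j] != word[j+L]  (indices are always in range in Source B,
-- so pyGet? … |>.getD is exact here)
def pvBPrefix (cs : List Char) (L : Int) : List Int :=
  (PySem.List.pyRange 0 ((cs.length : Int) - L) 1).foldl
    (fun p j =>
      p ++ [(PySem.List.pyGet? p (-1)).getD 0 +
            (if (PySem.List.pyGet? cs j).getD ' ' ≠ (PySem.List.pyGet? cs (j + L)).getD ' '
             then 1 else 0)]) [0]

-- 'for i in range(...)': return repaired word at the first zero mismatch window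
def pvBScan (cs : List Char) (L : Int) (p : List Int) : List Int → Option (List Char)
  | [] => none
  | i :: rest =>
    if (PySem.List.pyGet? p (i + L)).getD 0 - (PySem.List.pyGet? p i).getD 0 = 0 then
      some (PySem.List.slice cs none (some (i + L)) ++ PySem.List.slice cs (some (i + 2 * L)) none)
    else pvBScan cs L p rest

-- 'for L in reversed(range(2, n//2+1))' with early return
def pvBOuter (cs : List Char) : List Int → Option (List Char)
  | [] => none
  | L :: rest =>
    match pvBScan cs L (pvBPrefix cs L) (PySem.List.pyRange 0 ((cs.length : Int) - 2 * L + 1) 1) with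
    | some r => some r
    | none => pvBOuter cs rest

def pvBCleanWord (word : String) : String :=
  let cs := word.toList
  if cs.length ≤ 2 then word
  else
    match pvBOuter cs (PySem.List.pyRange 2 (PySem.Int.floordiv (cs.length : Int) 2 + 1) 1).reverse with
    | some r => String.ofList r
    | none => word

-- B's single loop: clean each word and append it unless equal to the previous cleaned word
def pvBDedupClean : List String → Option String → List String → List String
  | [], _, res => res
  | w0 :: rest, prev, res =>
    let w := pvBCleanWord w0
    pvBDedupClean rest (some w) (if some w ≠ prev then res ++ [w] else res)

def clean_duplicated_words_py_alt (words_list : List String) : List String :=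
  pvBDedupClean words_list none []

-- ===== PRECONDITION & SPEC =====
def Spec_clean_duplicated_words_py (words_list : List String) (out : List String) : Prop := out = clean_duplicated_words_py_alt words_list
instance (words_list : List String) (out : List String) : Decidable (Spec_clean_duplicated_words_py words_list out) := by unfold Spec_clean_duplicated_words_py; infer_instance

-- ===== CLAIM (what is proved, stated in full; the proofs are below) =====
def Claim_equal_clean_duplicated_words_py : Prop := ∀ (words_list : List String), Dom_clean_duplicated_words_py words_list → Spec_clean_duplicated_words_py words_list (clean_duplicated_words_py words_list)

-- ===== LEMMAS AND PROOFS =====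

def pvMM (cs : List Char) (Ln : Nat) (j : Nat) : Bool :=
  decide (cs.getD j ' ' ≠ cs.getD (j + Ln) ' ')

def pvS (cs : List Char) (Ln : Nat) (k : Nat) : Int :=
  ((List.range k).countP (pvMM cs Ln) : Int)

theorem pvS_succ (cs : List Char) (Ln m : Nat) :
    pvS cs Ln (m + 1) = pvS cs Ln m + (if pvMM cs Ln m then 1 else 0) := by
  simp [pvS, List.range_succ, List.countP_append, List.countP_cons]

theorem pvAux (cs : List Char) (Ln : Nat) (m : Nat) :
    ((List.range m).map (fun k => Int.ofNat k)).foldl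
      (fun p j =>
        p ++ [(PySem.List.pyGet? p (-1)).getD 0 +
              (if (PySem.List.pyGet? cs j).getD ' ' ≠ (PySem.List.pyGet? cs (j + (Ln : Int))).getD ' '
               then 1 else 0)]) [0] = (List.range (m + 1)).map (pvS cs Ln) := by
  induction m with
  | zero => simp [pvS]
  | succ m ih =>
      rw [List.range_succ (n := m), List.map_append, List.foldl_append, ih]
      rw [List.range_succ (n := m + 1), List.map_append]
      simp only [List.map_cons, List.map_nil, List.foldl_cons, List.foldl_nil]
      congr 1
      · have hlast : PySem.List.pyGet? ((List.range (m + 1)).map (pvS cs Ln)) (-1)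
            = some (pvS cs Ln m) := by
          rw [PySem.List.pyGet?_neg_one, List.range_succ, List.map_append]
          simp
        rw [hlast]
        have h1 : PySem.List.pyGet? cs (m : Int) = cs[m]? := PySem.List.pyGet?_natCast cs m
        have h2 : PySem.List.pyGet? cs ((m : Int) + (Ln : Int)) = cs[m + Ln]? := by
          rw [show (m : Int) + (Ln : Int) = ((m + Ln : Nat) : Int) by push_cast; ring]
          exact PySem.List.pyGet?_natCast cs (m + Ln)
        rw [pvS_succ]
        simp only [Int.ofNat_eq_natCast, Option.getD_some, h1, h2, pvMM,
          ← List.getD_eq_getElem?_getD, decide_eq_true_eq]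

theorem pvBPrefix_closed (cs : List Char) (Ln : Nat) (h : Ln ≤ cs.length) :
    pvBPrefix cs (Ln : Int) = (List.range (cs.length - Ln + 1)).map (pvS cs Ln) := by
  unfold pvBPrefix
  rw [show (cs.length : Int) - (Ln : Int) = ((cs.length - Ln : Nat) : Int) by omega]
  rw [PySem.List.pyRange_zero_nat]
  have := pvAux cs Ln (cs.length - Ln)
  simpa [Int.ofNat_eq_natCast] using this

theorem pvWindow_zero (cs : List Char) (Ln i : Nat) :
    pvS cs Ln (i + Ln) - pvS cs Ln i = 0 ↔
      ∀ k < Ln, cs.getD (i + k) ' ' = cs.getD (i + k + Ln) ' ' := by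
  unfold pvS
  rw [List.range_add, List.countP_append, List.countP_map]
  have : ∀ a b : Nat, ((a + b : Nat) : Int) - (a : Int) = 0 ↔ b = 0 := by intro a b; omega
  rw [this]
  rw [List.countP_eq_zero]
  constructor
  · intro h k hk
    have := h k (List.mem_range.mpr hk)
    simpa [pvMM, Function.comp, Nat.add_comm] using this
  · intro h k hk
    have := h k (List.mem_range.mp hk)
    simpa [pvMM, Function.comp, Nat.add_comm] using this

theorem pvChunkD1 (cs : List Char) (Ln i k : Nat) (h : i + 2*Ln ≤ cs.length) (hk : k < Ln) :
    ((cs.drop i).take Ln).getD k ' ' = cs.getD (i + k) ' ' := by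
  rw [List.getD_eq_getElem _ _ (by simp; omega), List.getD_eq_getElem _ _ (by omega)]
  simp [List.getElem_take, List.getElem_drop]

theorem pvChunkD2 (cs : List Char) (Ln i k : Nat) (h : i + 2*Ln ≤ cs.length) (hk : k < Ln) :
    ((cs.drop (i+Ln)).take Ln).getD k ' ' = cs.getD (i + k + Ln) ' ' := by
  rw [List.getD_eq_getElem _ _ (by simp; omega), List.getD_eq_getElem _ _ (by omega)]
  simp [List.getElem_take, List.getElem_drop]
  congr 1; omega

theorem pvSlice_eq_iff (cs : List Char) (Ln i : Nat) (h : i + 2 * Ln ≤ cs.length) :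
    (PySem.List.slice cs (some (i : Int)) (some ((i : Int) + Ln)) =
       PySem.List.slice cs (some ((i : Int) + Ln)) (some ((i : Int) + Ln * 2))) ↔
      ∀ k < Ln, cs.getD (i + k) ' ' = cs.getD (i + k + Ln) ' ' := by
  have h1 : PySem.List.slice cs (some (i : Int)) (some ((i:Int) + Ln)) = (cs.drop i).take Ln :=
    PySem.List.slice_natCast_add cs i Ln
  have h2 : PySem.List.slice cs (some ((i:Int) + Ln)) (some ((i:Int) + Ln * 2)) =
      (cs.drop (i+Ln)).take Ln := by
    have := PySem.List.slice_natCast_add cs (i+Ln) Ln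
    rw [show ((i+Ln:Nat):Int) = (i:Int)+(Ln:Int) by push_cast; ring] at this
    rw [show (i:Int)+(Ln:Int)+(Ln:Int) = (i:Int)+(Ln:Int)*2 by ring] at this
    exact this
  rw [h1, h2]
  have len1 : ((cs.drop i).take Ln).length = Ln := by simp; omega
  have len2 : ((cs.drop (i+Ln)).take Ln).length = Ln := by simp; omega
  constructor
  · intro he k hk
    rw [← pvChunkD1 cs Ln i k h hk, ← pvChunkD2 cs Ln i k h hk, he]
  · intro hp
    apply List.ext_getElem (by rw [len1, len2])
    intro k hk1 hk2
    have hk : k < Ln := by omega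
    have := hp k hk
    rw [← pvChunkD1 cs Ln i k h hk, ← pvChunkD2 cs Ln i k h hk] at this
    rw [List.getD_eq_getElem _ _ hk1, List.getD_eq_getElem _ _ hk2] at this
    exact this

theorem pvScan_eq_inner (cs : List Char) (Ln : Nat) (hL : Ln ≤ cs.length)
    (is : List Int) (hb : ∀ i ∈ is, 0 ≤ i ∧ i.toNat + 2 * Ln ≤ cs.length) :
    pvBScan cs (Ln : Int) ((List.range (cs.length - Ln + 1)).map (pvS cs Ln)) is =
      (pvAInner cs (Ln : Int) is).map
        (fun i => PySem.List.slice cs none (some (i + (Ln : Int))) ++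
                  PySem.List.slice cs (some (i + (Ln : Int) * 2)) none) := by
  induction is with
  | nil => rfl
  | cons i rest ih =>
    obtain ⟨h0, h2n⟩ := hb i (List.mem_cons_self ..)
    have hpget : ∀ k : Nat, k ≤ cs.length - Ln →
        PySem.List.pyGet? ((List.range (cs.length - Ln + 1)).map (pvS cs Ln)) (k : Int)
          = some (pvS cs Ln k) := by
      intro k hk
      rw [PySem.List.pyGet?_natCast]
      simp [Nat.lt_succ_of_le hk]
    have hBiff :
        ((PySem.List.pyGet? ((List.range (cs.length - Ln + 1)).map (pvS cs Ln)) (i + (Ln:Int))).getD 0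
          - (PySem.List.pyGet? ((List.range (cs.length - Ln + 1)).map (pvS cs Ln)) i).getD 0 = 0) ↔
        (PySem.List.slice cs (some i) (some (i + (Ln:Int))) =
          PySem.List.slice cs (some (i + (Ln:Int))) (some (i + (Ln:Int) * 2))) := by
      rw [show i = ((i.toNat : Nat) : Int) by omega]
      rw [show ((i.toNat : Nat) : Int) + (Ln:Int) = ((i.toNat + Ln : Nat) : Int) by push_cast; ring]
      rw [hpget _ (by omega), hpget _ (by omega)]
      simp only [Option.getD_some]
      rw [show ((i.toNat + Ln : Nat) : Int) = ((i.toNat : Nat) : Int) + (Ln:Int) by push_cast; ring]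
      exact (pvWindow_zero cs Ln i.toNat).trans (pvSlice_eq_iff cs Ln i.toNat h2n).symm
    simp only [pvBScan, pvAInner]
    by_cases hA : PySem.List.slice cs (some i) (some (i + (Ln:Int))) =
        PySem.List.slice cs (some (i + (Ln:Int))) (some (i + (Ln:Int) * 2))
    · rw [if_pos hA, if_pos (hBiff.mpr hA)]
      rw [show i + 2 * (Ln:Int) = i + (Ln:Int) * 2 by ring]
      rfl
    · rw [if_neg hA, if_neg (fun h => hA (hBiff.mp h))]
      exact ih (fun j hj => hb j (List.mem_cons_of_mem _ hj))

theorem pvBOuter_append (cs : List Char) (xs ys : List Int) :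
    pvBOuter cs (xs ++ ys) =
      match pvBOuter cs xs with
      | some r => some r
      | none => pvBOuter cs ys := by
  induction xs with
  | nil => rfl
  | cons x xs ih =>
    simp only [List.cons_append, pvBOuter, ih]
    cases pvBScan cs x (pvBPrefix cs x)
        (PySem.List.pyRange 0 ((cs.length : Int) - 2 * x + 1) 1) <;> rfl

theorem pvStep (cs : List Char) (L : Int) (h2 : 2 ≤ L) (hhalf : L.toNat ≤ cs.length / 2) :
    pvBScan cs L (pvBPrefix cs L) (PySem.List.pyRange 0 ((cs.length : Int) - 2 * L + 1) 1) =
      (pvAInner cs L (PySem.List.pyRange 0 ((cs.length : Int) - L * 2 + 1) 1)).map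
        (fun i => PySem.List.slice cs none (some (i + L)) ++
                  PySem.List.slice cs (some (i + L * 2)) none) := by
  have h2n : 2 * L.toNat ≤ cs.length := by omega
  rw [show L = ((L.toNat : Nat) : Int) by omega]
  rw [show (cs.length : Int) - 2 * ((L.toNat : Nat) : Int) + 1
        = (cs.length : Int) - ((L.toNat : Nat) : Int) * 2 + 1 by ring]
  rw [pvBPrefix_closed cs L.toNat (by omega)]
  apply pvScan_eq_inner cs L.toNat (by omega)
  intro i hi
  rw [PySem.List.mem_pyRange_one] at hi
  exact ⟨hi.1, by omega⟩

theorem pvOuter_eq (cs : List Char) (Ls : List Int)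
    (hb : ∀ L ∈ Ls, 2 ≤ L ∧ L.toNat ≤ cs.length / 2) (c : List Char) :
    pvAOuter cs Ls c =
      match pvBOuter cs Ls.reverse with
      | some r => r
      | none => c := by
  induction Ls generalizing c with
  | nil => rfl
  | cons L rest ih =>
    obtain ⟨h2, hhalf⟩ := hb L (List.mem_cons_self ..)
    have hb' : ∀ L' ∈ rest, 2 ≤ L' ∧ L'.toNat ≤ cs.length / 2 :=
      fun L' h => hb L' (List.mem_cons_of_mem _ h)
    simp only [pvAOuter, List.reverse_cons, pvBOuter_append]
    have hstep := pvStep cs L h2 hhalf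
    cases hin : pvAInner cs L (PySem.List.pyRange 0 ((cs.length : Int) - L * 2 + 1) 1) with
    | none =>
      have hscan : pvBScan cs L (pvBPrefix cs L)
          (PySem.List.pyRange 0 ((cs.length : Int) - 2 * L + 1) 1) = none := by
        rw [hstep, hin]; rfl
      simp only [pvBOuter, hscan]
      rw [ih hb' c]
      cases pvBOuter cs rest.reverse <;> rfl
    | some i =>
      have hscan : pvBScan cs L (pvBPrefix cs L)
          (PySem.List.pyRange 0 ((cs.length : Int) - 2 * L + 1) 1)
          = some (PySem.List.slice cs none (some (i + L)) ++
                  PySem.List.slice cs (some (i + L * 2)) none) := by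
        rw [hstep, hin]; rfl
      simp only [pvBOuter, hscan]
      rw [ih hb']
      cases pvBOuter cs rest.reverse <;> rfl

theorem pvCleanWord_eq (word : String) : pvACleanWord word = pvBCleanWord word := by
  unfold pvACleanWord pvBCleanWord
  by_cases h : word.toList.length ≤ 2
  · rw [if_pos h, if_pos h]
  · simp only [if_neg h]
    have hb : ∀ L ∈ PySem.List.pyRange 2 (PySem.Int.floordiv (word.toList.length : Int) 2 + 1) 1,
        2 ≤ L ∧ L.toNat ≤ word.toList.length / 2 := by
      intro L hL
      rw [PySem.List.mem_pyRange_one] at hL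
      have h2 : PySem.Int.floordiv (word.toList.length : Int) 2
          = ((word.toList.length / 2 : Nat) : Int) := by
        exact_mod_cast PySem.Int.floordiv_natCast word.toList.length 2
      rw [h2] at hL
      exact ⟨hL.1, by omega⟩
    rw [pvOuter_eq word.toList _ hb word.toList]
    cases pvBOuter word.toList
        (PySem.List.pyRange 2 (PySem.Int.floordiv (word.toList.length : Int) 2 + 1) 1).reverse with
    | some r => rfl
    | none => exact String.ofList_toList

theorem pvDedup_eq (ws : List String) (prev : Option String) (res : List String) :
    pvBDedupClean ws prev res = pvADedup (ws.map pvACleanWord) prev res := by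
  induction ws generalizing prev res with
  | nil => rfl
  | cons w rest ih =>
      simp only [pvBDedupClean, pvADedup, List.map_cons, ← pvCleanWord_eq w]
      exact ih _ _

-- ===== VERDICT (by name: the statement is the Claim_ definition above) =====
theorem clean_duplicated_words_py_spec : Claim_equal_clean_duplicated_words_py := by
  intro ws _
  show clean_duplicated_words_py ws = clean_duplicated_words_py_alt ws
  unfold clean_duplicated_words_py clean_duplicated_words_py_alt
  rcases ws with _ | ⟨w, rest⟩
  · rfl
  · simp only [if_neg (List.cons_ne_nil w rest)]
    rw [pvDedup_eq, PySem.List.foldl_append_singleton_eq_map, List.nil_append]
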